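-- pv_equiv track=rewrite | github.com/sarath-mutnuru/EPI_python_codes | 6.11_print_sinusoidally.py | get_sinusoidally
-- ===== SOURCE A (Python) =====
-- def get_sinusoidally(s):
--     ans = []
--     for i in range(1, len(s), 4):
--         ans.append(s[i])
--     for i in range(0, len(s), 2):
--         ans.append(s[i])
--     for i in range(3, len(s), 4):
--         ans.append(s[i])
--     return ''.join(ans)
-- ===== SOURCE B (Python) =====
-- def get_sinusoidally(s):
--     top, mid, bot = [], [], []
--     for i, c in enumerate(s):
--         if i % 4 == 1:
--             top.append(c)
--         elif i % 4 == 3: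
--             bot.append(c)
--         else:
--             mid.append(c)
--     return ''.join(top + mid + bot)
-- ===== Notes on version B (the rewrite author's own statement) =====
-- stated objective: simpler
-- what changed: Replaces A's three separate strided index scans over the string with a single enumerate pass that dispatches each character by i%4 into top/middle/bottom buckets, then concatenates the buckets.
import Mathlib
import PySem

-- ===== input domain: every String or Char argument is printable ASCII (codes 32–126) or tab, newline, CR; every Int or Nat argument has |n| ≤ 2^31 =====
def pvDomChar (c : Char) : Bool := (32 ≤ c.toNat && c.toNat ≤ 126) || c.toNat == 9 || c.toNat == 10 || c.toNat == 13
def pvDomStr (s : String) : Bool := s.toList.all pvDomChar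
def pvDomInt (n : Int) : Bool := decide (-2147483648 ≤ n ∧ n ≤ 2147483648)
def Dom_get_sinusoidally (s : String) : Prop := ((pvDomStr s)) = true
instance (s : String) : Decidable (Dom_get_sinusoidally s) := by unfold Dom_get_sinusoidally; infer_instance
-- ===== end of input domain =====

-- B replaces A's three strided index scans with a single enumerate pass dispatching by i % 4 into three buckets (objective: simpler).


-- ===== PORT A =====
-- three strided loops 'for i in range(a, len(s), st): ans.append(s[i])', then ''.join(ans)
def get_sinusoidally (s : String) : String :=
  let cs := s.toList
  let ans1 := (PySem.List.pyRange 1 (PySem.Str.len s) 4).foldl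
    (fun acc i => acc ++ [PySem.List.pyGetD cs i ' ']) []
  let ans2 := (PySem.List.pyRange 0 (PySem.Str.len s) 2).foldl
    (fun acc i => acc ++ [PySem.List.pyGetD cs i ' ']) ans1
  let ans3 := (PySem.List.pyRange 3 (PySem.Str.len s) 4).foldl
    (fun acc i => acc ++ [PySem.List.pyGetD cs i ' ']) ans2
  String.ofList ans3

-- ===== PORT B =====
-- loop body of B: dispatch (i, c) into the (top, mid, bot) buckets by i % 4
def sinStep (acc : List Char × List Char × List Char) (p : Int × Char) :
    List Char × List Char × List Char :=
  if PySem.Int.mod p.1 4 = 1 then (acc.1 ++ [p.2], acc.2.1, acc.2.2)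
  else if PySem.Int.mod p.1 4 = 3 then (acc.1, acc.2.1, acc.2.2 ++ [p.2])
  else (acc.1, acc.2.1 ++ [p.2], acc.2.2)

def get_sinusoidally_alt (s : String) : String :=
  let t := (PySem.List.enumerate s.toList 0).foldl sinStep ([], [], [])
  String.ofList (t.1 ++ (t.2.1 ++ t.2.2))

-- ===== PRECONDITION & SPEC =====
def Spec_get_sinusoidally (s : String) (out : String) : Prop := out = get_sinusoidally_alt s
instance (s : String) (out : String) : Decidable (Spec_get_sinusoidally s out) := by unfold Spec_get_sinusoidally; infer_instance

-- ===== CLAIM (what is proved, stated in full; the proofs are below) =====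
def Claim_equal_get_sinusoidally : Prop := ∀ (s : String), Dom_get_sinusoidally s → Spec_get_sinusoidally s (get_sinusoidally s)

-- ===== LEMMAS AND PROOFS =====

-- the characters of cs at positions a, a+st, a+2*st, … (countdown-counter form)
def pick (st : Int) : Int → List Char → List Char
  | _, [] => []
  | a, c :: cs => if a = 0 then c :: pick st (st - 1) cs else pick st (a - 1) cs

theorem pick_nil (st a : Int) : pick st a [] = [] := rfl

theorem pick_cons_zero (st : Int) (c : Char) (cs : List Char) :
    pick st 0 (c :: cs) = c :: pick st (st - 1) cs := by simp [pick]

theorem pick_cons_ne (st a : Int) (c : Char) (cs : List Char) (h : a ≠ 0) :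
    pick st a (c :: cs) = pick st (a - 1) cs := by simp [pick, h]

theorem pyRange_cons_pos (a b st : Int) (hst : 0 < st) (hab : a < b) :
    PySem.List.pyRange a b st = a :: PySem.List.pyRange (a + st) b st := by
  rw [PySem.List.pyRange_of_pos a b hst, PySem.List.pyRange_of_pos (a + st) b hst]
  have hdiv : (b - a + st - 1) / st = (b - a - 1) / st + 1 := by
    rw [show b - a + st - 1 = (b - a - 1) + 1 * st by ring,
      Int.add_mul_ediv_right _ _ (by omega : st ≠ 0)]
  have hN : (if a < b then ((b - a + st - 1) / st).toNat else 0)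
      = (if a + st < b then ((b - (a + st) + st - 1) / st).toNat else 0) + 1 := by
    rw [show b - (a + st) + st - 1 = b - a - 1 by ring, if_pos hab, hdiv]
    split_ifs with h2
    · have : (0:Int) ≤ (b - a - 1) / st := Int.ediv_nonneg (by omega) (by omega)
      omega
    · have : (b - a - 1) / st = 0 := Int.ediv_eq_zero_of_lt (by omega) (by omega)
      omega
  rw [hN, List.range_succ_eq_map, List.map_cons, List.map_map]
  refine congrArg₂ List.cons (by simp) ?_
  apply List.map_congr_left
  intro k _
  simp only [Function.comp_apply, Nat.succ_eq_add_one]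
  push_cast
  ring

-- shifting the whole strided scan one position left along the list
theorem map_pyRange_shift (c : Char) (cs : List Char) (a st : Int)
    (ha : 1 ≤ a) (hst : 0 < st) :
    (PySem.List.pyRange a ((cs.length : Int) + 1) st).map
        (fun i => PySem.List.pyGetD (c :: cs) i ' ')
      = (PySem.List.pyRange (a - 1) (cs.length : Int) st).map
        (fun i => PySem.List.pyGetD cs i ' ') := by
  rw [PySem.List.pyRange_of_pos _ _ hst, PySem.List.pyRange_of_pos _ _ hst]
  have hN : (if a < (cs.length : Int) + 1 then (((cs.length : Int) + 1 - a + st - 1) / st).toNat else 0)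
      = (if a - 1 < (cs.length : Int) then (((cs.length : Int) - (a - 1) + st - 1) / st).toNat else 0) := by
    rw [show (cs.length : Int) + 1 - a + st - 1 = (cs.length : Int) - (a - 1) + st - 1 by ring]
    split_ifs with h2 h3 <;> omega
  rw [hN, List.map_map, List.map_map]
  apply List.map_congr_left
  intro k _
  have h0 : (0:Int) ≤ st * (k : Int) := by positivity
  simp only [Function.comp_apply]
  rw [PySem.List.pyGetD_of_nonneg _ _ (by omega), PySem.List.pyGetD_of_nonneg _ _ (by omega)]
  rw [show (a + st * (k : Int)).toNat = ((a - 1) + st * (k : Int)).toNat + 1 by omega]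
  simp [List.getD]

-- A's strided scan is exactly the pick selection
theorem map_pyRange_eq_pick (st : Int) (hst : 0 < st) (cs : List Char) :
    ∀ (a : Int), 0 ≤ a →
    (PySem.List.pyRange a (cs.length : Int) st).map (fun i => PySem.List.pyGetD cs i ' ')
      = pick st a cs := by
  induction cs with
  | nil =>
    intro a ha
    rw [PySem.List.pyRange_of_pos _ _ hst]
    simp only [List.length_nil, Nat.cast_zero]
    rw [if_neg (by omega)]
    simp [pick_nil]
  | cons c cs ih =>
    intro a ha
    have hlen : (((c :: cs).length : Nat) : Int) = (cs.length : Int) + 1 := by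
      simp [List.length_cons]
    rcases eq_or_ne a 0 with rfl | hne
    · rw [hlen, pyRange_cons_pos 0 _ st hst (by omega), List.map_cons, zero_add,
        map_pyRange_shift c cs st st (by omega) hst,
        ih (st - 1) (by omega), pick_cons_zero]
      congr 1
      simp [PySem.List.pyGetD_ofNat']
    · rw [hlen, map_pyRange_shift c cs a st (by omega) hst, ih (a - 1) (by omega),
        pick_cons_ne st a c cs hne]

-- B's single pass maintains the three pick selections with countdown counters
theorem fold_inv (cs : List Char) :
    ∀ (a : Int) (t m b : List Char), 0 ≤ a →
    (PySem.List.enumerate cs a).foldl sinStep (t, m, b)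
      = (t ++ pick 4 ((1 - a) % 4) cs, m ++ pick 2 ((0 - a) % 2) cs, b ++ pick 4 ((3 - a) % 4) cs) := by
  induction cs with
  | nil => intro a t m b ha; simp [PySem.List.enumerate_nil, pick_nil]
  | cons c cs ih =>
    intro a t m b ha
    rw [PySem.List.enumerate_cons, List.foldl_cons]
    have hmod : PySem.Int.mod a 4 = a % 4 := PySem.Int.mod_eq_emod_of_pos (by norm_num)
    by_cases h1 : a % 4 = 1
    · simp only [sinStep, hmod, h1]
      rw [ih (a + 1) _ _ _ (by omega)]
      rw [show (1 - a) % 4 = 0 by omega, pick_cons_zero,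
        show (0 - a) % 2 = 1 by omega, pick_cons_ne 2 1 c cs (by norm_num),
        show (3 - a) % 4 = 2 by omega, pick_cons_ne 4 2 c cs (by norm_num)]
      rw [show (1 - (a + 1)) % 4 = 4 - 1 by omega,
        show (0 - (a + 1)) % 2 = 1 - 1 by omega,
        show (3 - (a + 1)) % 4 = 2 - 1 by omega]
      simp
    · by_cases h3 : a % 4 = 3
      · simp only [sinStep, hmod, h3]
        rw [ih (a + 1) _ _ _ (by omega)]
        rw [show (1 - a) % 4 = 2 by omega, pick_cons_ne 4 2 c cs (by norm_num),
          show (0 - a) % 2 = 1 by omega, pick_cons_ne 2 1 c cs (by norm_num),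
          show (3 - a) % 4 = 0 by omega, pick_cons_zero]
        rw [show (1 - (a + 1)) % 4 = 2 - 1 by omega,
          show (0 - (a + 1)) % 2 = 1 - 1 by omega,
          show (3 - (a + 1)) % 4 = 4 - 1 by omega]
        simp
      · simp only [sinStep, hmod, if_neg h1, if_neg h3]
        rw [ih (a + 1) _ _ _ (by omega)]
        have hne1 : (1 - a) % 4 ≠ 0 := by omega
        have hne3 : (3 - a) % 4 ≠ 0 := by omega
        rw [pick_cons_ne 4 _ c cs hne1,
          show (0 - a) % 2 = 0 by omega, pick_cons_zero,
          pick_cons_ne 4 _ c cs hne3]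
        rw [show (1 - (a + 1)) % 4 = (1 - a) % 4 - 1 by omega,
          show (0 - (a + 1)) % 2 = 2 - 1 by omega,
          show (3 - (a + 1)) % 4 = (3 - a) % 4 - 1 by omega]
        simp

-- ===== VERDICT (by name: the statement is the Claim_ definition above) =====
theorem get_sinusoidally_spec : Claim_equal_get_sinusoidally := by
  unfold Claim_equal_get_sinusoidally
  intro s _
  unfold Spec_get_sinusoidally get_sinusoidally get_sinusoidally_alt
  simp only [PySem.Str.len_eq]
  rw [fold_inv s.toList 0 [] [] [] le_rfl]
  rw [PySem.List.foldl_append_singleton_eq_map, PySem.List.foldl_append_singleton_eq_map,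
    PySem.List.foldl_append_singleton_eq_map]
  rw [map_pyRange_eq_pick 4 (by norm_num) s.toList 1 (by norm_num),
    map_pyRange_eq_pick 2 (by norm_num) s.toList 0 le_rfl,
    map_pyRange_eq_pick 4 (by norm_num) s.toList 3 (by norm_num)]
  norm_num
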